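-- pv_equiv track=rewrite | github.com/jacobusmmsmit/optimal_cards | laserbeams.py | laserbeam
-- ===== SOURCE A (Python) =====
-- def gcd(x, y):
--     if y == 0:
--         return x
--     return gcd(y, x % y)
--
-- def laserbeam(n):
--     if n % 2 == 0:
--         return 0
--     if n == 1:
--         return 1
--     r = (n + 3) // 2  # number of rows
--     x0 = (-r) % 3
--     cnt = 0
--     for x in range(x0, r // 2, 3):
--         y = r - x
--         if gcd(x, y) == 1:
--             cnt += 1
--     return 2 * cnt
-- ===== SOURCE B (Python) =====
-- def laserbeam(n):
--     # inclusion-exclusion over the squarefree divisors of r instead of a gcd scan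
--     if n % 2 == 0:
--         return 0
--     if n == 1:
--         return 1
--     r = (n + 3) // 2
--     m = r // 2
--     x0 = (-r) % 3
--     if m <= x0:
--         return 0
--     # distinct prime factors of r by trial division (r >= 2 here)
--     primes = []
--     t = r
--     p = 2
--     while p * p <= t:
--         if t % p == 0:
--             primes.append(p)
--             while t % p == 0:
--                 t //= p
--         p += 1
--     if t > 1:
--         primes.append(t)
--     # signed squarefree divisors (d, mu(d))
--     divs = [(1, 1)]
--     for q in primes:
--         divs = divs + [(d * q, -s) for (d, s) in divs]
--     # x = x0 + 3*t for t in [0, T); count t with d | x0 + 3*t by a closed formula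
--     T = (m - x0 + 2) // 3
--     total = 0
--     for (d, s) in divs:
--         if d % 3 == 0:
--             if x0 % 3 != 0:
--                 continue  # 3 | d but 3 does not divide x0: no solutions
--             M = d // 3
--             t0 = 0
--         else:
--             inv = (2 * d + 1) // 3 if d % 3 == 1 else (d + 1) // 3  # inverse of 3 mod d
--             t0 = ((-x0) * inv) % d
--             M = d
--         total += s * ((T - t0 + M - 1) // M)
--     return 2 * total
-- ===== Notes on version B (the rewrite author's own statement) =====
-- stated objective: faster
-- what changed: A scans the whole arithmetic progression and runs Euclid's gcd on every element; B factorizes r once by trial division and counts the coprime elements by inclusion-exclusion over the signed squarefree divisors of r, counting each residue class in the progression with a closed-form division (using a closed-form inverse of 3 mod d).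
import Mathlib
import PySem

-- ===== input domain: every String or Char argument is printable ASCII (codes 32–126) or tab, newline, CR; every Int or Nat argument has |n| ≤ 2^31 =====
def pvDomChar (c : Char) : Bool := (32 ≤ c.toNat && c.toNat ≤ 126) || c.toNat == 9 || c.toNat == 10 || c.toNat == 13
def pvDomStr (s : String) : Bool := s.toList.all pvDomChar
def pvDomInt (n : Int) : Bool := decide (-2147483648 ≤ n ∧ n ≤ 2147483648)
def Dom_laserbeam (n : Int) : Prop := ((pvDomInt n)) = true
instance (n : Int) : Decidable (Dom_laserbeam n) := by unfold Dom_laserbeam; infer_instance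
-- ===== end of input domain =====

-- B replaces A's linear gcd scan over the progression by factorizing r and
-- counting each residue class with a closed formula (inclusion–exclusion); faster.

-- ===== PORT A =====

-- termination helper for the recursive Euclid of A
theorem pvMod_natAbs_lt (x y : Int) (hy : y ≠ 0) :
    (PySem.Int.mod x y).natAbs < y.natAbs := by
  rcases lt_or_gt_of_ne hy with h | h
  · have h1 := PySem.Int.mod_neg_bounds x h
    omega
  · have h1 := PySem.Int.mod_nonneg x h
    have h2 := PySem.Int.mod_lt x h
    omega

def pvGcd (x y : Int) : Int :=
  if h : y = 0 then x else pvGcd y (PySem.Int.mod x y)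
termination_by y.natAbs
decreasing_by exact pvMod_natAbs_lt x y h

def laserbeam (n : Int) : Int :=
  if PySem.Int.mod n 2 = 0 then 0
  else if n = 1 then 1
  else
    let r := PySem.Int.floordiv (n + 3) 2
    let x0 := PySem.Int.mod (-r) 3
    let cnt := (PySem.List.pyRange x0 (PySem.Int.floordiv r 2) 3).foldl
      (fun cnt x => if pvGcd x (r - x) = 1 then cnt + 1 else cnt) 0
    2 * cnt

-- ===== PORT B =====

-- helper lemmas the ports need for termination (cited in decreasing_by)
theorem pvDiv_lt_self {t p : Int} (hp : 2 ≤ p) (ht : 0 < t) : t / p < t := by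
  apply Int.ediv_lt_of_lt_mul <;> nlinarith

-- inner 'while t % p == 0: t //= p' of B
theorem pvStrip_dec (t p : Int) (h : 2 ≤ p ∧ 0 < t ∧ PySem.Int.mod t p = 0) :
    (PySem.Int.floordiv t p).toNat < t.toNat := by
  have hpos : (0:Int) < p := by omega
  rw [PySem.Int.floordiv_eq_ediv_of_pos hpos]
  have h1 : (0:Int) ≤ t / p := Int.ediv_nonneg (by omega) (by omega)
  have h2 : t / p < t := pvDiv_lt_self h.1 h.2.1
  omega

def pvStrip (t p : Int) : Int :=
  if h : 2 ≤ p ∧ 0 < t ∧ PySem.Int.mod t p = 0 then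
    pvStrip (PySem.Int.floordiv t p) p
  else t
termination_by t.toNat
decreasing_by exact pvStrip_dec t p h

theorem pvStrip_pos_dvd : ∀ (k : Nat) (t p : Int), t.toNat ≤ k → 0 < t →
    0 < pvStrip t p ∧ pvStrip t p ∣ t := by
  intro k
  induction k with
  | zero => intro t p hk ht; omega
  | succ k ih =>
    intro t p hk ht
    rw [pvStrip]
    split
    · next h =>
      have hpos : (0:Int) < p := by omega
      have hdvd : p ∣ t := (PySem.Int.mod_eq_zero_iff_dvd t p).mp h.2.2
      rw [PySem.Int.floordiv_eq_ediv_of_pos hpos]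
      have hq : 0 < t / p := (by nlinarith [Int.ediv_mul_cancel hdvd] : 0 < t / p)
      have hlt : t / p < t := pvDiv_lt_self h.1 ht
      have := ih (t / p) p (by omega) hq
      exact ⟨this.1, this.2.trans (Int.ediv_dvd_of_dvd hdvd)⟩
    · exact ⟨ht, dvd_refl t⟩

theorem pvStrip_le_div (t p : Int) (hp : 2 ≤ p) (ht : 0 < t)
    (hm : PySem.Int.mod t p = 0) : pvStrip t p ≤ PySem.Int.floordiv t p := by
  rw [pvStrip]
  rw [dif_pos ⟨hp, ht, hm⟩]
  have hpos : (0:Int) < p := by omega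
  have hdvd : p ∣ t := (PySem.Int.mod_eq_zero_iff_dvd t p).mp hm
  have hq : 0 < PySem.Int.floordiv t p := by
    rw [PySem.Int.floordiv_eq_ediv_of_pos hpos]
    exact (by nlinarith [Int.ediv_mul_cancel hdvd] : 0 < t / p)
  have := pvStrip_pos_dvd (PySem.Int.floordiv t p).toNat (PySem.Int.floordiv t p) p (le_refl _) hq
  exact Int.le_of_dvd hq this.2

theorem pvFactor_dec1 (t p : Int) (h : 2 ≤ p ∧ p * p ≤ t) (hm : PySem.Int.mod t p = 0) :
    (pvStrip t p).toNat + (pvStrip t p - (p + 1)).toNat < t.toNat + (t - p).toNat := by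
  have ht : (0:Int) < t := by nlinarith [h.1, h.2]
  have hs := pvStrip_pos_dvd t.toNat t p (le_refl _) ht
  have hle := pvStrip_le_div t p h.1 ht hm
  rw [PySem.Int.floordiv_eq_ediv_of_pos (by omega : (0:Int) < p)] at hle
  have h2 : t / p * p ≤ t := Int.ediv_mul_le t (by omega)
  have h3 : 0 ≤ t / p := Int.ediv_nonneg (by omega) (by omega)
  have h4 : 2 * (t / p) ≤ t / p * p := by nlinarith [h.1]
  omega

theorem pvFactor_dec2 (t p : Int) (h : 2 ≤ p ∧ p * p ≤ t) :
    t.toNat + (t - (p + 1)).toNat < t.toNat + (t - p).toNat := by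
  have : p < t := by nlinarith [h.1, h.2]
  omega

-- outer trial-division loop of B
def pvFactor (t p : Int) (primes : List Int) : List Int :=
  if h : 2 ≤ p ∧ p * p ≤ t then
    if hm : PySem.Int.mod t p = 0 then
      pvFactor (pvStrip t p) (p + 1) (primes ++ [p])
    else
      pvFactor t (p + 1) primes
  else
    primes ++ (if 1 < t then [t] else [])
termination_by t.toNat + (t - p).toNat
decreasing_by
  · exact pvFactor_dec1 t p h hm
  · exact pvFactor_dec2 t p h

def laserbeam_alt (n : Int) : Int :=
  if PySem.Int.mod n 2 = 0 then 0
  else if n = 1 then 1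
  else
    let r := PySem.Int.floordiv (n + 3) 2
    let m := PySem.Int.floordiv r 2
    let x0 := PySem.Int.mod (-r) 3
    if m ≤ x0 then 0
    else
      let primes := pvFactor r 2 []
      let divs := primes.foldl
        (fun divs q => divs ++ divs.map (fun ds => (ds.1 * q, -ds.2)))
        [((1:Int), (1:Int))]
      let T := PySem.Int.floordiv (m - x0 + 2) 3
      let total := divs.foldl (fun total ds =>
        if PySem.Int.mod ds.1 3 = 0 then
          if ¬ (PySem.Int.mod x0 3 = 0) then total
          else
            let M := PySem.Int.floordiv ds.1 3
            total + ds.2 * PySem.Int.floordiv (T - 0 + M - 1) M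
        else
          let inv := if PySem.Int.mod ds.1 3 = 1
            then PySem.Int.floordiv (2 * ds.1 + 1) 3
            else PySem.Int.floordiv (ds.1 + 1) 3
          let t0 := PySem.Int.mod ((-x0) * inv) ds.1
          total + ds.2 * PySem.Int.floordiv (T - t0 + ds.1 - 1) ds.1) 0
      2 * total

-- ===== PRECONDITION & SPEC =====
def Spec_laserbeam (n : Int) (out : Int) : Prop := out = laserbeam_alt n
instance (n : Int) (out : Int) : Decidable (Spec_laserbeam n out) := by unfold Spec_laserbeam; infer_instance

-- ===== CLAIM (what is proved, stated in full; the proofs are below) =====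
def Claim_equal_laserbeam : Prop := ∀ (n : Int), Dom_laserbeam n → Spec_laserbeam n (laserbeam n)

-- ===== LEMMAS AND PROOFS =====

-- A's recursive Euclid computes the mathematical gcd on nonnegative arguments
theorem pvGcd_eq_gcd : ∀ (k : Nat) (x y : Int), y.toNat ≤ k → 0 ≤ x → 0 ≤ y →
    pvGcd x y = (Int.gcd x y : Int) := by
  intro k
  induction k with
  | zero =>
    intro x y hk hx hy
    have hy0 : y = 0 := by omega
    subst hy0
    rw [pvGcd]
    simp [Int.gcd, Int.natAbs_of_nonneg hx]
  | succ k ih =>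
    intro x y hk hx hy
    rw [pvGcd]
    split
    · next h => subst h; simp [Int.gcd, Int.natAbs_of_nonneg hx]
    · next h =>
      have hy0 : 0 < y := by omega
      rw [PySem.Int.mod_eq_emod_of_pos hy0]
      have hmn : 0 ≤ x % y := Int.emod_nonneg x (by omega)
      have hml : x % y < y := Int.emod_lt_of_pos x hy0
      rw [ih y (x % y) (by omega) hy (by omega)]
      rw [Int.gcd_comm y (x % y), Int.gcd_emod]

-- full specification of the stripping loop
theorem pvStrip_spec : ∀ (k : Nat) (t p : Int), t.toNat ≤ k → 0 < t → 2 ≤ p →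
    (¬ p ∣ pvStrip t p) ∧
    (∀ q : Int, Prime q → q ∣ t → q ∣ p ∨ q ∣ pvStrip t p) := by
  intro k
  induction k with
  | zero => intro t p hk ht hp; omega
  | succ k ih =>
    intro t p hk ht hp
    rw [pvStrip]
    split
    · next h =>
      have hpos : (0:Int) < p := by omega
      have hdvd : p ∣ t := (PySem.Int.mod_eq_zero_iff_dvd t p).mp h.2.2
      rw [PySem.Int.floordiv_eq_ediv_of_pos hpos]
      have hq : 0 < t / p := by nlinarith [Int.ediv_mul_cancel hdvd]
      have hlt : t / p < t := pvDiv_lt_self h.1 ht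
      obtain ⟨ih1, ih2⟩ := ih (t / p) p (by omega) hq hp
      refine ⟨ih1, ?_⟩
      intro q hq' hqt
      have hqm : q ∣ p * (t / p) := by rw [Int.mul_ediv_cancel' hdvd]; exact hqt
      rcases (hq'.dvd_mul).mp hqm with h1 | h1
      · exact Or.inl h1
      · exact ih2 q hq' h1
    · next h =>
      have hnd : ¬ p ∣ t := by
        intro hc
        exact h ⟨hp, ht, (PySem.Int.mod_eq_zero_iff_dvd t p).mpr hc⟩
      exact ⟨hnd, fun q _ hqt => Or.inr hqt⟩

-- an integer ≥ 2 all of whose divisors > 1 are ≥ some bound b with b * b > it, is prime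
theorem pv_prime_of_no_small (t b : Int) (ht : 1 < t) (hb : 2 ≤ b)
    (hbig : t < b * b) (hmin : ∀ q : Int, 1 < q → q ∣ t → b ≤ q) : Prime t := by
  rw [Int.prime_iff_natAbs_prime]
  rw [Nat.prime_def_lt]
  constructor
  · omega
  · intro m hm hmd
    by_contra hm1
    have hm0 : m ≠ 0 := by
      intro h0; subst h0
      have := Nat.eq_zero_of_zero_dvd hmd
      omega
    have hm2 : 2 ≤ m := by omega
    have hmz : (m:Int) ∣ t := by
      have : (m:Int) ∣ (t.natAbs : Int) := Int.natCast_dvd_natCast.mpr hmd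
      rwa [Int.natAbs_of_nonneg (by omega)] at this
    obtain ⟨c, hc⟩ := hmz
    have hc1 : 1 < c := by
      rcases lt_trichotomy c 1 with h | h | h
      · nlinarith
      · subst h; simp at hc; omega
      · exact h
    have h1 := hmin (m:Int) (by exact_mod_cast hm2) ⟨c, hc⟩
    have h2 := hmin c hc1 ⟨m, by rw [hc]; ring⟩
    nlinarith

-- two positive primes that divide one another are equal
theorem pv_prime_dvd_prime_eq {q p : Int} (hq : Prime q) (hp : Prime p)
    (hq0 : 0 < q) (hp0 : 0 < p) (hd : q ∣ p) : q = p := by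
  have h1 : q.natAbs.Prime := Int.prime_iff_natAbs_prime.mp hq
  have h2 : p.natAbs.Prime := Int.prime_iff_natAbs_prime.mp hp
  have h3 : q.natAbs ∣ p.natAbs := Int.natAbs_dvd_natAbs.mpr hd
  have h4 := (Nat.prime_dvd_prime_iff_eq h1 h2).mp h3
  omega

theorem pvFactor_spec : ∀ (k : Nat) (t p : Int) (acc : List Int),
    t.toNat + (t - p).toNat ≤ k → 0 < t → 2 ≤ p →
    (∀ q : Int, 1 < q → q ∣ t → p ≤ q) →
    ∃ L, pvFactor t p acc = acc ++ L ∧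
      (∀ d ∈ L, Prime d ∧ d ∣ t ∧ p ≤ d) ∧
      (∀ q : Int, Prime q → 0 < q → q ∣ t → q ∈ L) ∧
      L.Pairwise (· < ·) := by
  intro k
  induction k with
  | zero => intro t p acc hk ht hp hmin; omega
  | succ k ih =>
    intro t p acc hk ht hp hmin
    rw [pvFactor]
    split
    · next h =>
      have hpos : (0:Int) < p := by omega
      have hpt : p < t := by nlinarith [h.1, h.2]
      split
      · next hm =>
        have hdvd : p ∣ t := (PySem.Int.mod_eq_zero_iff_dvd t p).mp hm
        have hpprime : Prime p := by
          rw [Int.prime_iff_natAbs_prime, Nat.prime_def_lt]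
          constructor
          · omega
          · intro m hmlt hmd
            by_contra hm1
            have hm0 : m ≠ 0 := by
              intro h0; subst h0
              have := Nat.eq_zero_of_zero_dvd hmd
              omega
            have hm2 : 2 ≤ m := by omega
            have hmz : (m:Int) ∣ p := by
              have : (m:Int) ∣ (p.natAbs : Int) := Int.natCast_dvd_natCast.mpr hmd
              rwa [Int.natAbs_of_nonneg (by omega)] at this
            have := hmin (m:Int) (by exact_mod_cast hm2) (hmz.trans hdvd)
            omega
        obtain ⟨hs1, hs2⟩ := pvStrip_pos_dvd t.toNat t p (le_refl _) ht
        obtain ⟨hnp, hqdec⟩ := pvStrip_spec t.toNat t p (le_refl _) ht hp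
        have hle := pvStrip_le_div t p h.1 ht hm
        rw [PySem.Int.floordiv_eq_ediv_of_pos hpos] at hle
        have hdm : t / p * p ≤ t := Int.ediv_mul_le t (by omega)
        have hd2 : 2 * (t / p) ≤ t := by nlinarith [h.1, Int.ediv_nonneg (le_of_lt ht) (le_of_lt hpos)]
        have hmin' : ∀ q : Int, 1 < q → q ∣ pvStrip t p → p + 1 ≤ q := by
          intro q hq1 hq2
          have hge := hmin q hq1 (hq2.trans hs2)
          rcases eq_or_lt_of_le hge with rfl | h'
          · exact absurd hq2 hnp
          · omega
        obtain ⟨L, hL, hLa, hLb, hLc⟩ :=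
          ih (pvStrip t p) (p + 1) (acc ++ [p]) (by omega) hs1 (by omega) hmin'
        refine ⟨p :: L, ?_, ?_, ?_, ?_⟩
        · rw [hL]; simp
        · intro d hd
          rcases List.mem_cons.mp hd with rfl | hd'
          · exact ⟨hpprime, hdvd, le_refl d⟩
          · obtain ⟨h1, h2, h3⟩ := hLa d hd'
            exact ⟨h1, h2.trans hs2, by omega⟩
        · intro q hqP hq0 hqt
          rcases hqdec q hqP hqt with h1 | h1
          · have : q = p := pv_prime_dvd_prime_eq hqP hpprime hq0 hpos h1
            rw [this]
            exact List.mem_cons_self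
          · exact List.mem_cons_of_mem p (hLb q hqP hq0 h1)
        · refine List.Pairwise.cons ?_ hLc
          intro d hd
          have := (hLa d hd).2.2
          omega
      · next hm =>
        have hnd : ¬ p ∣ t := fun hc => hm ((PySem.Int.mod_eq_zero_iff_dvd t p).mpr hc)
        have hmin' : ∀ q : Int, 1 < q → q ∣ t → p + 1 ≤ q := by
          intro q hq1 hq2
          have hge := hmin q hq1 hq2
          rcases eq_or_lt_of_le hge with rfl | h'
          · exact absurd hq2 hnd
          · omega
        obtain ⟨L, hL, hLa, hLb, hLc⟩ := ih t (p + 1) acc (by omega) ht (by omega) hmin'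
        refine ⟨L, hL, ?_, hLb, hLc⟩
        intro d hd
        obtain ⟨h1, h2, h3⟩ := hLa d hd
        exact ⟨h1, h2, by omega⟩
    · next h =>
      have hbig : t < p * p := by
        by_contra hc
        exact h ⟨hp, by omega⟩
      by_cases ht1 : 1 < t
      · refine ⟨[t], by rw [if_pos ht1], ?_, ?_, ?_⟩
        · intro d hd
          rw [List.mem_singleton] at hd
          subst hd
          exact ⟨pv_prime_of_no_small d p ht1 hp hbig hmin, dvd_refl d, hmin d ht1 (dvd_refl d)⟩
        · intro q hqP hq0 hqt
          have htp : Prime t := pv_prime_of_no_small t p ht1 hp hbig hmin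
          have : q = t := pv_prime_dvd_prime_eq hqP htp hq0 (by omega) hqt
          rw [this]
          exact List.mem_singleton_self t
        · simp
      · have ht1' : t = 1 := by omega
        refine ⟨[], by rw [if_neg ht1], by simp, ?_, by simp⟩
        intro q hqP _ hqt
        rw [ht1'] at hqt
        exact absurd (isUnit_of_dvd_one hqt) hqP.not_unit


-- characterization of coprimality through the prime-factor list
theorem pv_gcd_one_iff (x r : Int) (hx : 0 ≤ x) (hr : 2 ≤ r) (L : List Int)
    (hL1 : ∀ d ∈ L, Prime d ∧ d ∣ r)
    (hL2 : ∀ q : Int, Prime q → 0 < q → q ∣ r → q ∈ L) :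
    (Int.gcd x r = 1) ↔ ∀ d ∈ L, ¬ d ∣ x := by
  constructor
  · intro hg d hd hdx
    obtain ⟨hdp, hdr⟩ := hL1 d hd
    have : d ∣ (Int.gcd x r : Int) := Int.dvd_coe_gcd hdx hdr
    rw [hg] at this
    exact hdp.not_unit (isUnit_of_dvd_one (by exact_mod_cast this))
  · intro hno
    by_contra hg
    have hg0 : Int.gcd x r ≠ 0 := by
      intro h0
      have := Int.eq_zero_of_gcd_eq_zero_right h0
      omega
    obtain ⟨q, hqP, hqd⟩ := Nat.exists_prime_and_dvd hg
    have hq1 : (q:Int) ∣ (Int.gcd x r : Int) := Int.natCast_dvd_natCast.mpr hqd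
    have hqx : (q:Int) ∣ x := hq1.trans (Int.gcd_dvd_left x r)
    have hqr : (q:Int) ∣ r := hq1.trans (Int.gcd_dvd_right x r)
    have hqprime : Prime (q:Int) := Nat.prime_iff_prime_int.mp hqP
    have hqpos : (0:Int) < q := by exact_mod_cast hqP.pos
    exact hno _ (hL2 (q:Int) hqprime hqpos hqr) hqx

-- every first component in the signed-divisor fold stays positive
theorem pv_divs_pos : ∀ (L : List Int) (acc : List (Int × Int)),
    (∀ p ∈ L, 0 < p) → (∀ ds ∈ acc, 0 < ds.1) →
    ∀ ds ∈ L.foldl (fun divs q => divs ++ divs.map (fun ds => (ds.1 * q, -ds.2))) acc,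
      0 < ds.1 := by
  intro L
  induction L with
  | nil => intro acc _ hacc; simpa using hacc
  | cons p L ih =>
    intro acc hL hacc
    simp only [List.foldl_cons]
    apply ih
    · intro q hq; exact hL q (List.mem_cons_of_mem p hq)
    · intro ds hds
      rcases List.mem_append.mp hds with h | h
      · exact hacc ds h
      · rcases List.mem_map.mp h with ⟨ds', hds', rfl⟩
        have := hacc ds' hds'
        have hp := hL p List.mem_cons_self
        simp only
        positivity

theorem pv_divs_sum (x : Int) : ∀ (L : List Int) (acc : List (Int × Int)),
    (∀ p ∈ L, Prime p ∧ 0 < p) → L.Pairwise (· < ·) →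
    (∀ p ∈ L, ∀ ds ∈ acc, ¬ p ∣ ds.1) →
    ((L.foldl (fun divs q => divs ++ divs.map (fun ds => (ds.1 * q, -ds.2))) acc).map
        (fun ds => ds.2 * (if ds.1 ∣ x then (1:Int) else 0))).sum
      = ((acc.map (fun ds => ds.2 * (if ds.1 ∣ x then (1:Int) else 0))).sum)
        * (L.map (fun p => 1 - (if p ∣ x then (1:Int) else 0))).prod := by
  intro L
  induction L with
  | nil => intro acc _ _ _; simp
  | cons p L ih =>
    intro acc hL hpw hacc
    obtain ⟨hpP, hp0⟩ := hL p List.mem_cons_self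
    have hLrest : ∀ q ∈ L, Prime q ∧ 0 < q := fun q hq => hL q (List.mem_cons_of_mem p hq)
    have hplt : ∀ q ∈ L, p < q := fun q hq => (List.pairwise_cons.mp hpw).1 q hq
    simp only [List.foldl_cons]
    rw [ih (acc ++ acc.map (fun ds => (ds.1 * p, -ds.2))) hLrest (List.pairwise_cons.mp hpw).2 ?side]
    case side =>
      intro q hq ds hds
      have hqP := (hLrest q hq).1
      have hqnp : ¬ q ∣ p := by
        intro hqp
        have := pv_prime_dvd_prime_eq hqP hpP (hLrest q hq).2 hp0 hqp
        have := hplt q hq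
        omega
      rcases List.mem_append.mp hds with h1 | h1
      · exact hacc q (List.mem_cons_of_mem p hq) ds h1
      · obtain ⟨ds', hds', rfl⟩ := List.mem_map.mp h1
        simp only
        intro hqd
        rcases hqP.dvd_mul.mp hqd with h2 | h2
        · exact hacc q (List.mem_cons_of_mem p hq) ds' hds' h2
        · exact hqnp h2
    -- now reduce the new acc sum
    have hsum : ((acc ++ acc.map (fun ds => (ds.1 * p, -ds.2))).map
        (fun ds => ds.2 * (if ds.1 ∣ x then (1:Int) else 0))).sum
        = ((acc.map (fun ds => ds.2 * (if ds.1 ∣ x then (1:Int) else 0))).sum)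
          * (1 - (if p ∣ x then (1:Int) else 0)) := by
      rw [List.map_append, List.sum_append, List.map_map]
      have hterm : ∀ ds ∈ acc,
          ((fun ds => ds.2 * (if ds.1 ∣ x then (1:Int) else 0)) ∘
            (fun ds => (ds.1 * p, -ds.2))) ds
          = (ds.2 * (if ds.1 ∣ x then (1:Int) else 0)) * (-(if p ∣ x then (1:Int) else 0)) := by
        intro ds hds
        simp only [Function.comp]
        have hcop : IsCoprime p ds.1 := (hpP.coprime_iff_not_dvd).mpr (hacc p List.mem_cons_self ds hds)
        have hiff : (ds.1 * p ∣ x) ↔ (ds.1 ∣ x ∧ p ∣ x) := by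
          constructor
          · intro h
            exact ⟨(dvd_mul_right ds.1 p).trans h, (dvd_mul_left p ds.1).trans h⟩
          · intro ⟨h1, h2⟩
            exact (hcop.symm).mul_dvd h1 h2
        by_cases h1 : ds.1 ∣ x <;> by_cases h2 : p ∣ x <;>
          simp [h1, h2, hiff, and_comm] <;> ring
      rw [List.map_congr_left hterm, List.sum_map_mul_right]
      ring
    rw [hsum, List.map_cons, List.prod_cons]
    ring


-- the product of the per-prime indicators is the "no prime divides" indicator
theorem pv_prod_ind (x : Int) : ∀ L : List Int,
    (L.map (fun p => 1 - (if p ∣ x then (1:Int) else 0))).prod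
      = if (∀ p ∈ L, ¬ p ∣ x) then (1:Int) else 0 := by
  intro L
  induction L with
  | nil => simp
  | cons p L ih =>
    simp only [List.map_cons, List.prod_cons, ih, List.mem_cons]
    by_cases hp : p ∣ x
    · simp [hp]
    · by_cases hL : ∀ q ∈ L, ¬ q ∣ x
      · simp [hp]
      · have h2 : ¬ (∀ q ∈ p :: L, ¬ q ∣ x) := by
          intro h; exact hL (fun q hq => h q (List.mem_cons_of_mem p hq))
        rw [if_neg hL, if_neg h2]
        ring

-- exchanging a double list sum
theorem pv_sum_swap {α β : Type} (xs : List α) (ys : List β) (g : α → β → Int) :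
    (xs.map (fun x => (ys.map (fun y => g x y)).sum)).sum
      = (ys.map (fun y => (xs.map (fun x => g x y)).sum)).sum := by
  induction xs with
  | nil => simp
  | cons x xs ih =>
    simp only [List.map_cons, List.sum_cons, ih]
    rw [← PySem.List.sum_map_add_int]

-- closed-form count of a residue class in an initial segment
theorem pv_ap_count (M t0 : Int) (hM : 0 < M) (h0 : 0 ≤ t0) (h1 : t0 < M) :
    ∀ K : Nat, ((List.range K).countP (fun k => decide (((k:Nat):Int) % M = t0)) : Int)
      = ((K:Int) - t0 + M - 1) / M := by
  intro K
  induction K with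
  | zero =>
    simp only [List.range_zero, List.countP_nil, Nat.cast_zero]
    symm
    apply Int.ediv_eq_zero_of_lt <;> omega
  | succ K ih =>
    rw [List.range_succ, List.countP_append]
    push_cast
    rw [ih]
    simp only [List.countP_cons, List.countP_nil]
    have ha : (0:Int) ≤ (K:Int) - t0 + M - 1 := by omega
    set a : Int := (K:Int) - t0 + M - 1 with hadef
    have hsucc : (a + 1) / M = a / M + if M ∣ a + 1 then 1 else 0 := by
      by_cases hd : M ∣ a + 1
      · obtain ⟨c, hc⟩ := hd
        rw [if_pos ⟨c, hc⟩]
        have hr : M * (c - 1) = M * c - M := by ring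
        have e1 : a + 1 = 0 + M * c := by omega
        have e2 : a = (M - 1) + M * (c - 1) := by omega
        rw [e1, e2, Int.add_mul_ediv_left _ _ (by omega : M ≠ 0),
            Int.add_mul_ediv_left _ _ (by omega : M ≠ 0),
            Int.ediv_eq_zero_of_lt (by omega) (by omega),
            Int.ediv_eq_zero_of_lt (by omega) (by omega)]
        ring
      · rw [if_neg hd]
        have hq := Int.ediv_add_emod a M
        have hb1 : 0 ≤ a % M := Int.emod_nonneg a (by omega)
        have hb2 : a % M < M := Int.emod_lt_of_pos a hM
        have hne : a % M ≠ M - 1 := by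
          intro hx
          have hr : M * (a / M + 1) = M * (a / M) + M := by ring
          exact hd ⟨a / M + 1, by omega⟩
        have e1 : a + 1 = (a % M + 1) + M * (a / M) := by omega
        have e2 : a = (a % M) + M * (a / M) := by omega
        rw [e1, Int.add_mul_ediv_left _ _ (by omega : M ≠ 0),
            Int.ediv_eq_zero_of_lt (by omega) (by omega)]
        omega
    have hiff : (M ∣ a + 1) ↔ ((K:Int) % M = t0) := by
      have e : a + 1 = ((K:Int) - t0) + M := by omega
      rw [e]
      constructor
      · intro h
        have h2 : M ∣ (K:Int) - t0 := by
          have := h.sub (dvd_refl M)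
          simpa using this
        have h3 : (K:Int) % M = t0 % M := by
          rw [Int.emod_eq_emod_iff_emod_sub_eq_zero, ← Int.dvd_iff_emod_eq_zero]
          exact h2
        rwa [Int.emod_eq_of_lt h0 h1] at h3
      · intro h
        have h3 : (K:Int) % M = t0 % M := by rw [h, Int.emod_eq_of_lt h0 h1]
        have h2 : M ∣ (K:Int) - t0 := by
          rw [Int.dvd_iff_emod_eq_zero, ← Int.emod_eq_emod_iff_emod_sub_eq_zero]
          exact h3
        exact dvd_add h2 (dvd_refl M)
    have harr : ((K:Int) + 1) - t0 + M - 1 = a + 1 := by omega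
    rw [harr, hsucc]
    by_cases hc : (K:Int) % M = t0
    · rw [if_pos (hiff.mpr hc)]; simp [hc]
    · rw [if_neg (fun h => hc (hiff.mp h))]; simp [hc]

-- the linear congruence solved by the closed-form inverse of 3
theorem pv_cong_iff (d x0 inv k : Int) (hd : 0 < d) (hinv : d ∣ 3 * inv - 1) :
    (d ∣ x0 + 3 * k) ↔ ((k:Int) % d = ((-x0) * inv) % d) := by
  constructor
  · intro h
    have h1 : (3 * k) ≡ -x0 [ZMOD d] := by
      rw [Int.ModEq]
      rw [Int.emod_eq_emod_iff_emod_sub_eq_zero]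
      rw [← Int.dvd_iff_emod_eq_zero]
      have : 3 * k - -x0 = x0 + 3 * k := by ring
      rw [this]; exact h
    have h2 : inv * (3 * k) ≡ inv * (-x0) [ZMOD d] := Int.ModEq.mul_left inv h1
    have h3 : k ≡ inv * (3 * k) [ZMOD d] := by
      rw [Int.ModEq, Int.emod_eq_emod_iff_emod_sub_eq_zero, ← Int.dvd_iff_emod_eq_zero]
      have : k - inv * (3 * k) = -k * (3 * inv - 1) := by ring
      rw [this]; exact Dvd.dvd.mul_left hinv (-k)
    have h4 : k ≡ (-x0) * inv [ZMOD d] := by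
      have := h3.trans h2
      have e : inv * (-x0) = (-x0) * inv := by ring
      rwa [e] at this
    exact h4
  · intro h
    have h1 : k ≡ (-x0) * inv [ZMOD d] := h
    have h2 : 3 * k ≡ 3 * ((-x0) * inv) [ZMOD d] := Int.ModEq.mul_left 3 h1
    have h3 : 3 * ((-x0) * inv) ≡ -x0 [ZMOD d] := by
      rw [Int.ModEq, Int.emod_eq_emod_iff_emod_sub_eq_zero, ← Int.dvd_iff_emod_eq_zero]
      have : 3 * ((-x0) * inv) - -x0 = -x0 * (3 * inv - 1) := by ring
      rw [this]; exact Dvd.dvd.mul_left hinv (-x0)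
    have h4 : 3 * k ≡ -x0 [ZMOD d] := h2.trans h3
    have h5 : d ∣ -x0 - 3 * k := (Int.modEq_iff_dvd).mp h4
    have : x0 + 3 * k = -(-x0 - 3*k) := by ring
    rw [this]
    exact dvd_neg.mpr h5

-- one inclusion-exclusion term: the closed-form count of multiples of d in the progression
theorem pv_per_divisor (x0 d s : Int) (K : Nat) (hd : 0 < d) (hx0a : 0 ≤ x0) (hx0b : x0 < 3) :
    s * ((List.range K).countP (fun k => decide (d ∣ x0 + 3 * ((k:Nat):Int))) : Int)
      = if PySem.Int.mod d 3 = 0 then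
          (if ¬ (PySem.Int.mod x0 3 = 0) then 0
           else s * PySem.Int.floordiv (((K:Int)) - 0 + PySem.Int.floordiv d 3 - 1)
                  (PySem.Int.floordiv d 3))
        else
          s * PySem.Int.floordiv
            (((K:Int)) - PySem.Int.mod ((-x0) *
                (if PySem.Int.mod d 3 = 1 then PySem.Int.floordiv (2 * d + 1) 3
                 else PySem.Int.floordiv (d + 1) 3)) d + d - 1) d := by
  have h3 : PySem.Int.mod d 3 = d % 3 := PySem.Int.mod_eq_emod_of_pos (by norm_num)
  have hx03 : PySem.Int.mod x0 3 = x0 := by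
    rw [PySem.Int.mod_eq_emod_of_pos (by norm_num)]
    exact Int.emod_eq_of_lt hx0a hx0b
  by_cases hc1 : PySem.Int.mod d 3 = 0
  · have h3d : (3:Int) ∣ d := (PySem.Int.mod_eq_zero_iff_dvd d 3).mp hc1
    rw [if_pos hc1]
    by_cases hc2 : x0 = 0
    · rw [if_neg (by rw [hx03]; simp [hc2])]
      have hdM : 3 * (d / 3) = d := Int.mul_ediv_cancel' h3d
      have hM : 0 < d / 3 := by omega
      have hcong : ∀ k ∈ List.range K,
          (decide (d ∣ x0 + 3 * ((k:Nat):Int)) = true) ↔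
          (decide (((k:Nat):Int) % (d / 3) = 0) = true) := by
        intro k _
        simp only [decide_eq_true_eq]
        rw [hc2]
        constructor
        · intro h
          rw [← Int.dvd_iff_emod_eq_zero]
          have h' : 3 * (d / 3) ∣ 3 * (k:Int) := by rw [hdM]; simpa using h
          exact (mul_dvd_mul_iff_left (by norm_num : (3:Int) ≠ 0)).mp h'
        · intro h
          rw [← Int.dvd_iff_emod_eq_zero] at h
          have h' : 3 * (d / 3) ∣ 3 * (k:Int) := mul_dvd_mul_left 3 h
          rw [hdM] at h'
          simpa using h'
      rw [List.countP_congr hcong, pv_ap_count (d/3) 0 hM (le_refl 0) hM K]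
      rw [PySem.Int.floordiv_eq_ediv_of_pos (by norm_num : (0:Int) < 3),
          PySem.Int.floordiv_eq_ediv_of_pos (by omega : (0:Int) < d / 3)]
    · rw [if_pos (by rw [hx03]; exact hc2)]
      have hzero : (List.range K).countP (fun k => decide (d ∣ x0 + 3 * ((k:Nat):Int))) = 0 := by
        rw [List.countP_eq_zero]
        intro k _
        simp only [decide_eq_true_eq]
        intro hdk
        have h3x : (3:Int) ∣ x0 + 3 * (k:Int) := h3d.trans hdk
        have : (3:Int) ∣ x0 := by
          have : x0 = (x0 + 3 * (k:Int)) - 3 * (k:Int) := by ring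
          rw [this]
          exact dvd_sub h3x ⟨(k:Int), rfl⟩
        omega
      rw [hzero]
      ring
  · rw [if_neg hc1]
    have hd3 : d % 3 = 1 ∨ d % 3 = 2 := by
      have h1 : 0 ≤ d % 3 := Int.emod_nonneg d (by norm_num)
      have h2 : d % 3 < 3 := Int.emod_lt_of_pos d (by norm_num)
      rw [h3] at hc1
      omega
    set inv := (if PySem.Int.mod d 3 = 1 then PySem.Int.floordiv (2 * d + 1) 3
                 else PySem.Int.floordiv (d + 1) 3) with hinvdef
    have hinv3 : d ∣ 3 * inv - 1 := by
      rcases hd3 with hcase | hcase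
      · have hdv : (3:Int) ∣ 2 * d + 1 := by omega
        have hcan : 3 * ((2 * d + 1) / 3) = 2 * d + 1 := Int.mul_ediv_cancel' hdv
        rw [hinvdef, if_pos (by rw [h3]; exact hcase),
            PySem.Int.floordiv_eq_ediv_of_pos (by norm_num : (0:Int) < 3)]
        exact ⟨2, by omega⟩
      · have hdv : (3:Int) ∣ d + 1 := by omega
        have hcan : 3 * ((d + 1) / 3) = d + 1 := Int.mul_ediv_cancel' hdv
        rw [hinvdef, if_neg (by rw [h3]; omega),
            PySem.Int.floordiv_eq_ediv_of_pos (by norm_num : (0:Int) < 3)]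
        exact ⟨1, by omega⟩
    set t0 := PySem.Int.mod ((-x0) * inv) d with ht0def
    have ht0a : 0 ≤ t0 := PySem.Int.mod_nonneg _ hd
    have ht0b : t0 < d := PySem.Int.mod_lt _ hd
    have ht0e : t0 = ((-x0) * inv) % d := by rw [ht0def, PySem.Int.mod_eq_emod_of_pos hd]
    have hcong : ∀ k ∈ List.range K,
        (decide (d ∣ x0 + 3 * ((k:Nat):Int)) = true) ↔
        (decide (((k:Nat):Int) % d = t0) = true) := by
      intro k _
      simp only [decide_eq_true_eq]
      rw [ht0e]
      exact pv_cong_iff d x0 inv (k:Int) hd hinv3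
    rw [List.countP_congr hcong, pv_ap_count d t0 hd ht0a ht0b K,
        PySem.Int.floordiv_eq_ediv_of_pos hd, ht0e]

-- B's accumulation loop is the sum of its per-divisor terms
theorem pv_fold_total (x0 T : Int) (l : List (Int × Int)) (init : Int) :
    l.foldl (fun total ds =>
      if PySem.Int.mod ds.1 3 = 0 then
        (if ¬ (PySem.Int.mod x0 3 = 0) then total
         else total + ds.2 * PySem.Int.floordiv (T - 0 + PySem.Int.floordiv ds.1 3 - 1)
                (PySem.Int.floordiv ds.1 3))
      else total + ds.2 * PySem.Int.floordiv
        (T - PySem.Int.mod ((-x0) *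
            (if PySem.Int.mod ds.1 3 = 1 then PySem.Int.floordiv (2 * ds.1 + 1) 3
             else PySem.Int.floordiv (ds.1 + 1) 3)) ds.1 + ds.1 - 1) ds.1) init
    = init + (l.map (fun ds =>
        if PySem.Int.mod ds.1 3 = 0 then
          (if ¬ (PySem.Int.mod x0 3 = 0) then 0
           else ds.2 * PySem.Int.floordiv (T - 0 + PySem.Int.floordiv ds.1 3 - 1)
                  (PySem.Int.floordiv ds.1 3))
        else ds.2 * PySem.Int.floordiv
          (T - PySem.Int.mod ((-x0) *
              (if PySem.Int.mod ds.1 3 = 1 then PySem.Int.floordiv (2 * ds.1 + 1) 3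
               else PySem.Int.floordiv (ds.1 + 1) 3)) ds.1 + ds.1 - 1) ds.1)).sum := by
  induction l generalizing init with
  | nil => simp
  | cons ds l ih =>
    simp only [List.foldl_cons, List.map_cons, List.sum_cons]
    rw [ih]
    split_ifs <;> ring

theorem pv_main (n : Int) : laserbeam n = laserbeam_alt n := by
  simp only [laserbeam, laserbeam_alt]
  by_cases h2 : PySem.Int.mod n 2 = 0
  · rw [if_pos h2, if_pos h2]
  · rw [if_neg h2, if_neg h2]
    by_cases h1 : n = 1
    · rw [if_pos h1, if_pos h1]
    · rw [if_neg h1, if_neg h1]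
      set r := PySem.Int.floordiv (n + 3) 2 with hrdef
      set m := PySem.Int.floordiv r 2 with hmdef
      set x0 := PySem.Int.mod (-r) 3 with hx0def
      by_cases hmx : m ≤ x0
      · rw [if_pos hmx]
        rw [PySem.List.pyRange_of_pos x0 m (by norm_num : (0:Int) < 3)]
        rw [if_neg (by omega : ¬ x0 < m)]
        simp
      · rw [if_neg hmx]
        rw [not_le] at hmx
        have hx0a : 0 ≤ x0 := PySem.Int.mod_nonneg _ (by norm_num)
        have hx0b : x0 < 3 := PySem.Int.mod_lt _ (by norm_num)
        have hmr : m * 2 ≤ r ∧ r < (m + 1) * 2 :=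
          (PySem.Int.floordiv_eq_iff_of_pos (by norm_num : (0:Int) < 2)).mp hmdef.symm
        have hr2 : 2 ≤ r := by omega
        have hmltr : m < r := by omega
        -- A side: expose the count over List.range
        rw [PySem.List.pyRange_of_pos x0 m (by norm_num : (0:Int) < 3), if_pos hmx]
        have e1 : m - x0 + 3 - 1 = m - x0 + 2 := by ring
        rw [e1]
        rw [PySem.List.foldl_ite_add_one (fun x => pvGcd x (r - x) = 1)]
        set K := ((m - x0 + 2) / 3).toNat with hKdef
        rw [List.countP_map]
        have hdivnn : 0 ≤ (m - x0 + 2) / 3 := Int.ediv_nonneg (by omega) (by norm_num)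
        have hKcast : (K:Int) = (m - x0 + 2) / 3 := by rw [hKdef, Int.toNat_of_nonneg hdivnn]
        have hK3 : (K:Int) * 3 ≤ m - x0 + 2 := by
          rw [hKcast]; exact Int.ediv_mul_le _ (by norm_num)
        -- B side: the prime factor list of r
        obtain ⟨L, hLeq, hLa, hLb, hLc⟩ := pvFactor_spec (r.toNat + (r - 2).toNat) r 2 []
          (le_refl _) (by omega) (by norm_num) (fun q hq _ => by omega)
        rw [List.nil_append] at hLeq
        rw [hLeq]
        set divs := L.foldl (fun divs q => divs ++ divs.map (fun ds => (ds.1 * q, -ds.2)))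
          [((1:Int), (1:Int))] with hdivsdef
        have hdpos : ∀ ds ∈ divs, 0 < ds.1 := by
          rw [hdivsdef]
          apply pv_divs_pos L _ (fun p hp => by have := (hLa p hp).2.2; omega)
          intro ds hds
          rw [List.mem_singleton] at hds
          rw [hds]
          norm_num
        -- T = K
        have hTe : PySem.Int.floordiv (m - x0 + 2) 3 = ((K:Nat):Int) := by
          rw [PySem.Int.floordiv_eq_ediv_of_pos (by norm_num : (0:Int) < 3), hKcast]
        rw [hTe]
        -- B fold to a sum
        rw [pv_fold_total x0 ((K:Nat):Int) divs 0]
        -- pointwise inclusion-exclusion identity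
        have hiffL : ∀ x : Int, 0 ≤ x → ((Int.gcd x r = 1) ↔ ∀ d ∈ L, ¬ d ∣ x) := fun x hx =>
          pv_gcd_one_iff x r hx hr2 L (fun d hd => ⟨(hLa d hd).1, (hLa d hd).2.1⟩) hLb
        have hpoint : ∀ x : Int, 0 ≤ x →
            (if Int.gcd x r = 1 then (1:Int) else 0)
              = (divs.map (fun ds => ds.2 * (if ds.1 ∣ x then (1:Int) else 0))).sum := by
          intro x hx
          rw [hdivsdef, pv_divs_sum x L [((1:Int), (1:Int))]
            (fun p hp => ⟨(hLa p hp).1, by have := (hLa p hp).2.2; omega⟩) hLc ?accc]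
          case accc =>
            intro p hp ds hds
            rw [List.mem_singleton] at hds
            rw [hds]
            intro hdvd
            exact (hLa p hp).1.not_unit (isUnit_of_dvd_one hdvd)
          rw [pv_prod_ind x L]
          simp only [List.map_cons, List.map_nil, List.sum_cons, List.sum_nil]
          by_cases hg : Int.gcd x r = 1
          · rw [if_pos hg, if_pos ((hiffL x hx).mp hg)]
            norm_num
          · rw [if_neg hg, if_neg (fun hc => hg ((hiffL x hx).mpr hc))]
            ring
        -- A count = sum over divisors of per-divisor counts
        have hA : (((List.range K).countP
              ((fun x => decide (pvGcd x (r - x) = 1)) ∘ (fun k => x0 + 3 * ((k:Nat):Int)))) : Int)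
            = (divs.map (fun ds => ds.2 *
                (((List.range K).countP (fun k => decide (ds.1 ∣ x0 + 3 * ((k:Nat):Int)))) : Int))).sum := by
          rw [← PySem.List.sum_map_ite_one_zero]
          have hstep : ∀ k ∈ List.range K,
              (if ((fun x => decide (pvGcd x (r - x) = 1)) ∘ (fun k => x0 + 3 * ((k:Nat):Int))) k = true
                then (1:Int) else 0)
              = ((divs.map (fun ds => ds.2 *
                  (if ds.1 ∣ x0 + 3 * ((k:Nat):Int) then (1:Int) else 0))).sum) := by
            intro k hk
            rw [List.mem_range] at hk
            set x : Int := x0 + 3 * ((k:Nat):Int) with hxdef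
            have hxnn : 0 ≤ x := by positivity
            have hkK : ((k:Nat):Int) ≤ (K:Int) - 1 := by
              have : ((k:Nat):Int) < (K:Int) := by exact_mod_cast hk
              omega
            have hxm : x < m := by
              have : 3 * ((k:Nat):Int) ≤ 3 * ((K:Int) - 1) := by omega
              omega
            have hrx : 0 ≤ r - x := by omega
            have hgcd : pvGcd x (r - x) = (Int.gcd x (r - x) : Int) :=
              pvGcd_eq_gcd (r - x).toNat x (r - x) (le_refl _) hxnn hrx
            have hgr : Int.gcd x (r - x) = Int.gcd x r := by
              have h := Int.gcd_add_self_right x (r - x)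
              have e : r - x + x = r := by ring
              rw [e] at h
              exact h.symm
            have hcond : (pvGcd x (r - x) = 1) ↔ (Int.gcd x r = 1) := by
              rw [hgcd, hgr]
              constructor
              · intro h; exact_mod_cast h
              · intro h; exact_mod_cast h
            simp only [Function.comp, decide_eq_true_eq]
            rw [if_congr hcond rfl rfl, hpoint x hxnn]
          rw [List.map_congr_left hstep]
          rw [pv_sum_swap (List.range K) divs
            (fun k ds => ds.2 * (if ds.1 ∣ x0 + 3 * ((k:Nat):Int) then (1:Int) else 0))]
          apply congrArg
          apply List.map_congr_left
          intro ds _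
          rw [List.sum_map_mul_left]
          apply congrArg
          have : ∀ k : Nat, (if ds.1 ∣ x0 + 3 * ((k:Nat):Int) then (1:Int) else 0)
              = (if (fun k : Nat => decide (ds.1 ∣ x0 + 3 * ((k:Nat):Int))) k = true then (1:Int) else 0) := by
            intro k
            simp
          rw [List.map_congr_left (fun k _ => this k)]
          rw [PySem.List.sum_map_ite_one_zero]
        rw [hA]
        -- finally, each per-divisor count equals B's closed formula
        apply congrArg
        have : (0:Int) + (divs.map (fun ds =>
            if PySem.Int.mod ds.1 3 = 0 then
              (if ¬ (PySem.Int.mod x0 3 = 0) then 0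
               else ds.2 * PySem.Int.floordiv (((K:Nat):Int) - 0 + PySem.Int.floordiv ds.1 3 - 1)
                      (PySem.Int.floordiv ds.1 3))
            else ds.2 * PySem.Int.floordiv
              (((K:Nat):Int) - PySem.Int.mod ((-x0) *
                  (if PySem.Int.mod ds.1 3 = 1 then PySem.Int.floordiv (2 * ds.1 + 1) 3
                   else PySem.Int.floordiv (ds.1 + 1) 3)) ds.1 + ds.1 - 1) ds.1)).sum
            = (divs.map (fun ds => ds.2 *
                (((List.range K).countP (fun k => decide (ds.1 ∣ x0 + 3 * ((k:Nat):Int)))) : Int))).sum := by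
          rw [zero_add]
          apply congrArg
          apply List.map_congr_left
          intro ds hds
          exact (pv_per_divisor x0 ds.1 ds.2 K (hdpos ds hds) hx0a hx0b).symm
        rw [this, zero_add]


-- ===== VERDICT (by name: the statement is the Claim_ definition above) =====
theorem laserbeam_spec : Claim_equal_laserbeam := by
  intro n _
  unfold Spec_laserbeam
  exact pv_main n
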